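-- pv_equiv track=rewrite | github.com/darehunt/DSC180B-Project2 | src/bigclam.py | correct_pred
-- ===== SOURCE A (Python) =====
-- def correct_pred(pred, genres, nodes):
--     total = 0
--     for i in range(len(pred)):
--         for j in range(len(pred)):
--             try:
--                 if i != j:
--                     if len(set(genres[pred[i].lower()]).intersection(set(genres[pred[j].lower()]))) > 0:
--                         total += 1
--                         break
--             except:
--                 continue
--     return total
-- ===== SOURCE B (Python) =====
-- def correct_pred(pred, genres, nodes):
--     # One pass: count, for each genre, how many positions' genre-sets contain it;
--     # a position counts iff some of its genres appears at >= 2 positions.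
--     counts = {}
--     lists = []
--     for p in pred:
--         gl = genres.get(p.lower())
--         lists.append(gl)
--         if gl is not None:
--             for g in set(gl):
--                 counts[g] = counts.get(g, 0) + 1
--     return sum(1 for gl in lists if gl is not None and any(counts[g] >= 2 for g in gl))
-- ===== Notes on version B (the rewrite author's own statement) =====
-- stated objective: faster
-- what changed: Replaced the quadratic all-pairs genre-set intersection scan by a single pass that builds one genre->number-of-positions counter and counts positions having a genre with count >= 2.
import Mathlib
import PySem

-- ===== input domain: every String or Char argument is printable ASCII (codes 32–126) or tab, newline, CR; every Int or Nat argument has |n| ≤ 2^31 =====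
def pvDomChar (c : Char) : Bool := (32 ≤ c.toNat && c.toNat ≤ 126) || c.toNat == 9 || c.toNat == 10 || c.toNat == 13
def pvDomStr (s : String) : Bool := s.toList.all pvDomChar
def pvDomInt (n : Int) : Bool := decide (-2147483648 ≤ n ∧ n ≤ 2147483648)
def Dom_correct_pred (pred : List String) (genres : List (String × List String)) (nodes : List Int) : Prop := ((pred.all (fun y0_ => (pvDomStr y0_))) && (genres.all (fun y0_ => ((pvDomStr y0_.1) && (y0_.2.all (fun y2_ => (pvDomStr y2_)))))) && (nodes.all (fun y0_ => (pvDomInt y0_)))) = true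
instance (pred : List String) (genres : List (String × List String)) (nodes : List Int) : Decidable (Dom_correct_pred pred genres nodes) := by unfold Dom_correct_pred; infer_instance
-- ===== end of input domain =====

-- B replaces A's all-pairs set-intersection scan by a one-pass genre->position-count map;
-- neither version mutates its arguments, the equivalence is about the return value.

-- shared helper: genres[p.lower()] as an Option (the dict lookup both Pythons perform)
def pvLookup (g : PySem.Dict String (List String)) (p : String) : Option (List String) :=
  g.get? (PySem.Str.lower p)

-- ===== PORT A =====
-- inner 'for j in range(len(pred))' loop over the enumerated list: returns 1 and breaks at the
-- first sharing j, else 0; the try/except swallows the KeyError of a missing key (catch-all arm)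
def correct_predInner (g : PySem.Dict String (List String)) (i : Int) (pi : String) :
    List (Int × String) → Int
  | [] => 0
  | (j, pj) :: rest =>
    if i ≠ j then
      match pvLookup g pi, pvLookup g pj with
      | some li, some lj =>
        if 0 < PySem.Set.len (PySem.Set.inter (PySem.Set.ofList li) (PySem.Set.ofList lj)) then 1
        else correct_predInner g i pi rest
      | _, _ => correct_predInner g i pi rest
    else correct_predInner g i pi rest

def correct_pred (pred : List String) (genres : List (String × List String)) (nodes : List Int) : Int :=
  let g : PySem.Dict String (List String) := PySem.Dict.mk genres
  (PySem.List.enumerate pred).foldl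
    (fun total p => total + correct_predInner g p.1 p.2 (PySem.List.enumerate pred)) 0

-- ===== PORT B =====
-- body of B's single counting pass: record genres.get(p.lower()) and bump the counter
-- once per distinct genre of that position
def pvStepB (g : PySem.Dict String (List String))
    (acc : PySem.Dict String Int × List (Option (List String))) (p : String) :
    PySem.Dict String Int × List (Option (List String)) :=
  let gl := pvLookup g p
  let counts := match gl with
    | some l => (PySem.Set.ofList l).foldl (fun d x => d.modify x 0 (· + 1)) acc.1
    | none => acc.1
  (counts, acc.2 ++ [gl])

def correct_pred_alt (pred : List String) (genres : List (String × List String)) (nodes : List Int) : Int :=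
  let g : PySem.Dict String (List String) := PySem.Dict.mk genres
  let acc := pred.foldl (pvStepB g) (PySem.Dict.empty, [])
  acc.2.foldl
    (fun t gl => match gl with
      | some l => if l.any (fun x => 2 ≤ acc.1.getD x 0) then t + 1 else t
      | none => t) 0

-- ===== PRECONDITION & SPEC =====
def Spec_correct_pred (pred : List String) (genres : List (String × List String)) (nodes : List Int) (out : Int) : Prop := out = correct_pred_alt pred genres nodes
instance (pred : List String) (genres : List (String × List String)) (nodes : List Int) (out : Int) : Decidable (Spec_correct_pred pred genres nodes out) := by unfold Spec_correct_pred; infer_instance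

-- ===== CLAIM (what is proved, stated in full; the proofs are below) =====
def Claim_equal_correct_pred : Prop := ∀ (pred : List String) (genres : List (String × List String)) (nodes : List Int), Dom_correct_pred pred genres nodes → Spec_correct_pred pred genres nodes (correct_pred pred genres nodes)

-- ===== LEMMAS AND PROOFS =====

-- proof-side predicates
def pvHas (g : PySem.Dict String (List String)) (x p : String) : Bool :=
  match pvLookup g p with
  | some l => decide (x ∈ l)
  | none => false

def pvHit (g : PySem.Dict String (List String)) (pi pj : String) : Bool :=
  match pvLookup g pi, pvLookup g pj with
  | some li, some lj =>
      decide (0 < PySem.Set.len (PySem.Set.inter (PySem.Set.ofList li) (PySem.Set.ofList lj)))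
  | _, _ => false

def pvGood (g : PySem.Dict String (List String)) (pred : List String) (p : String) : Bool :=
  match pvLookup g p with
  | some l => l.any (fun x => decide (2 ≤ (pred.countP (pvHas g x) : Int)))
  | none => false

lemma pvHas_iff (g : PySem.Dict String (List String)) (x p : String) :
    pvHas g x p = true ↔ ∃ l, pvLookup g p = some l ∧ x ∈ l := by
  unfold pvHas; cases h : pvLookup g p <;> simp [h]

lemma inter_pos (li lj : List String) :
    0 < PySem.Set.len (PySem.Set.inter (PySem.Set.ofList li) (PySem.Set.ofList lj)) ↔
      ∃ x, x ∈ li ∧ x ∈ lj := by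
  simp [PySem.Set.len, List.length_pos_iff_exists_mem, PySem.Set.mem_inter, PySem.Set.mem_ofList]

lemma pvHit_iff (g : PySem.Dict String (List String)) (pi pj : String) :
    pvHit g pi pj = true ↔
      ∃ li lj, pvLookup g pi = some li ∧ pvLookup g pj = some lj ∧ ∃ x, x ∈ li ∧ x ∈ lj := by
  unfold pvHit
  cases h1 : pvLookup g pi <;> cases h2 : pvLookup g pj <;> simp [h1, h2]
  simpa using inter_pos _ _

lemma pvHit_none (g : PySem.Dict String (List String)) (pi pj : String)
    (h : pvLookup g pi = none) : pvHit g pi pj = false := by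
  unfold pvHit; rw [h]

lemma inner_eq (g : PySem.Dict String (List String)) (i : Int) (pi : String) (e : List (Int × String)) :
    correct_predInner g i pi e =
      if e.any (fun q => decide (i ≠ q.1) && pvHit g pi q.2) then 1 else 0 := by
  induction e with
  | nil => simp [correct_predInner]
  | cons q rest ih =>
    obtain ⟨j, pj⟩ := q
    by_cases hij : i = j
    · subst hij
      have hd : (decide (i ≠ i) : Bool) = false := by simp
      simp only [correct_predInner, List.any_cons, hd, Bool.false_and, Bool.false_or]
      rw [if_neg (show ¬ (i ≠ i) by simp), ih]
    · cases hpi : pvLookup g pi with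
      | none =>
        cases hpj : pvLookup g pj with
        | none =>
          have hh : pvHit g pi pj = false := by unfold pvHit; rw [hpi, hpj]
          simp only [correct_predInner, List.any_cons, hpi, hpj]
          simp only [hh, Bool.and_false, Bool.false_or]
          simp [ih, hij]
        | some lj =>
          have hh : pvHit g pi pj = false := by unfold pvHit; rw [hpi, hpj]
          simp only [correct_predInner, List.any_cons, hpi, hpj]
          simp only [hh, Bool.and_false, Bool.false_or]
          simp [ih, hij]
      | some li =>
        cases hpj : pvLookup g pj with
        | none =>
          have hh : pvHit g pi pj = false := by unfold pvHit; rw [hpi, hpj]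
          simp only [correct_predInner, List.any_cons, hpi, hpj]
          simp only [hh, Bool.and_false, Bool.false_or]
          simp [ih, hij]
        | some lj =>
          have hh : pvHit g pi pj =
              decide (0 < PySem.Set.len (PySem.Set.inter (PySem.Set.ofList li) (PySem.Set.ofList lj))) := by
            unfold pvHit; rw [hpi, hpj]
          simp only [correct_predInner, List.any_cons, hpi, hpj]
          simp only [hh]
          by_cases hlen :
              0 < List.length (PySem.Set.inter (PySem.Set.ofList li) (PySem.Set.ofList lj))
          · have hd : (decide (0 < PySem.Set.len
                (PySem.Set.inter (PySem.Set.ofList li) (PySem.Set.ofList lj))) : Bool) = true := by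
              simp [PySem.Set.len, hlen]
            have hd2 : (decide ¬(i = j) : Bool) = true := by simp [hij]
            have hlen' : 0 < PySem.Set.len
                (PySem.Set.inter (PySem.Set.ofList li) (PySem.Set.ofList lj)) := by
              simpa [PySem.Set.len] using hlen
            simp only [hd, hd2, Bool.and_true, Bool.true_or]
            rw [if_pos hij, if_pos hlen']
            simp
          · have hd : (decide (0 < PySem.Set.len
                (PySem.Set.inter (PySem.Set.ofList li) (PySem.Set.ofList lj))) : Bool) = false := by
              simp [PySem.Set.len, hlen]
            have hlen' : ¬ 0 < PySem.Set.len
                (PySem.Set.inter (PySem.Set.ofList li) (PySem.Set.ofList lj)) := by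
              simpa [PySem.Set.len] using hlen
            simp only [hd, Bool.and_false, Bool.false_or]
            rw [if_pos hij, if_neg hlen', ih]

lemma foldl_countP_gen {α : Type} (F : Int → α → Int) (c : α → Bool)
    (h : ∀ t a, F t a = t + (if c a then 1 else 0)) :
    ∀ (l : List α) (t : Int), l.foldl F t = t + (l.countP c : Int) := by
  intro l
  induction l with
  | nil => intro t; simp
  | cons a l ih =>
    intro t
    rw [List.foldl_cons, ih, h, List.countP_cons]
    by_cases hc : c a
    · simp [hc]; ring
    · simp [hc]

lemma countP_snd {α : Type} (P : α → Bool) (xs : List α) :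
    xs.countP P = (PySem.List.enumerate xs).countP (fun q => P q.2) := by
  conv_lhs => rw [← PySem.List.map_snd_enumerate xs 0]
  rw [List.countP_map]
  rfl

lemma two_le_countP {α : Type} (p : α → Bool) {l : List α} {a b : α}
    (ha : a ∈ l) (hb : b ∈ l) (hab : a ≠ b) (hpa : p a = true) (hpb : p b = true) :
    2 ≤ l.countP p := by
  rw [List.countP_eq_length_filter]
  have ha' : a ∈ l.filter p := List.mem_filter.2 ⟨ha, hpa⟩
  have hb' : b ∈ l.filter p := List.mem_filter.2 ⟨hb, hpb⟩
  rcases hf : l.filter p with _ | ⟨c, _ | ⟨d, rest⟩⟩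
  · rw [hf] at ha'; simp at ha'
  · rw [hf] at ha' hb'; simp at ha' hb'; subst ha'; subst hb'; exact absurd rfl hab
  · simp

lemma A_eq (pred : List String) (genres : List (String × List String)) (nodes : List Int) :
    correct_pred pred genres nodes =
      (((PySem.List.enumerate pred).countP
        (fun p => (PySem.List.enumerate pred).any
          (fun q => decide (p.1 ≠ q.1) && pvHit (PySem.Dict.mk genres) p.2 q.2))) : Int) := by
  unfold correct_pred
  rw [foldl_countP_gen _ _ (fun t p => by rw [inner_eq]) _ 0, zero_add]

lemma stepB_snd (g : PySem.Dict String (List String)) :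
    ∀ (l : List String) (acc : PySem.Dict String Int × List (Option (List String))),
      (l.foldl (pvStepB g) acc).2 = acc.2 ++ l.map (pvLookup g) := by
  intro l
  induction l with
  | nil => intro acc; simp
  | cons p l ih =>
    intro acc
    rw [List.foldl_cons, ih (pvStepB g acc p)]
    have h2 : (pvStepB g acc p).2 = acc.2 ++ [pvLookup g p] := rfl
    rw [h2]
    simp

lemma stepB_fst (g : PySem.Dict String (List String)) (x : String) :
    ∀ (l : List String) (acc : PySem.Dict String Int × List (Option (List String))),
      ((l.foldl (pvStepB g) acc).1).getD x 0 = acc.1.getD x 0 + (l.countP (pvHas g x) : Int) := by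
  intro l
  induction l with
  | nil => intro acc; simp
  | cons p l ih =>
    intro acc
    rw [List.foldl_cons, ih (pvStepB g acc p), List.countP_cons]
    cases hgl : pvLookup g p with
    | none =>
      have h1 : (pvStepB g acc p).1 = acc.1 := by simp [pvStepB, hgl]
      rw [h1]
      simp [pvHas, hgl]
    | some lst =>
      have h1 : (pvStepB g acc p).1 =
          (PySem.Set.ofList lst).foldl (fun d x => d.modify x 0 (· + 1)) acc.1 := by
        simp [pvStepB, hgl]
      rw [h1, PySem.Dict.getD_foldl_modify_add_one]
      by_cases hx : x ∈ lst
      · rw [List.count_eq_one_of_mem (PySem.Set.nodup_ofList lst) ((PySem.Set.mem_ofList lst x).2 hx)]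
        simp [pvHas, hgl, hx]
        ring
      · rw [List.count_eq_zero_of_not_mem (fun h => hx ((PySem.Set.mem_ofList lst x).1 h))]
        simp [pvHas, hgl, hx]

lemma B_eq (pred : List String) (genres : List (String × List String)) (nodes : List Int) :
    correct_pred_alt pred genres nodes =
      ((pred.countP (pvGood (PySem.Dict.mk genres) pred)) : Int) := by
  simp only [correct_pred_alt]
  rw [foldl_countP_gen _
      (fun gl => match gl with
        | some l => l.any (fun x => decide
            (2 ≤ ((pred.foldl (pvStepB (PySem.Dict.mk genres)) (PySem.Dict.empty, [])).1).getD x 0))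
        | none => false)
      (by
        intro t gl
        rcases gl with _ | l
        · simp
        · by_cases h : l.any (fun x => decide
              (2 ≤ ((pred.foldl (pvStepB (PySem.Dict.mk genres)) (PySem.Dict.empty, [])).1).getD x 0)) <;>
            simp [h]) _ 0, zero_add]
  rw [stepB_snd (PySem.Dict.mk genres) pred (PySem.Dict.empty, [])]
  simp only [List.nil_append, List.countP_map]
  congr 1
  apply List.countP_congr
  intro p _
  have hfst : ∀ x, ((pred.foldl (pvStepB (PySem.Dict.mk genres)) (PySem.Dict.empty, [])).1).getD x 0 =
      (pred.countP (pvHas (PySem.Dict.mk genres) x) : Int) := by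
    intro x
    rw [stepB_fst (PySem.Dict.mk genres) x pred (PySem.Dict.empty, [])]
    simp [PySem.Dict.getD_empty]
  cases hgl : pvLookup (PySem.Dict.mk genres) p <;>
    simp [pvGood, hgl, Function.comp, hfst]

lemma main_pt (g : PySem.Dict String (List String)) (pred : List String) (i : Int) (pi : String)
    (hmem : (i, pi) ∈ PySem.List.enumerate pred) :
    ((PySem.List.enumerate pred).any (fun q => decide (i ≠ q.1) && pvHit g pi q.2)) =
      pvGood g pred pi := by
  cases hpi : pvLookup g pi with
  | none =>
    have hR : pvGood g pred pi = false := by simp [pvGood, hpi]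
    rw [hR, List.any_eq_false]
    intro q _
    simp [pvHit_none g pi q.2 hpi]
  | some li =>
    rw [Bool.eq_iff_iff]
    simp only [List.any_eq_true, Bool.and_eq_true, decide_eq_true_eq, pvGood, hpi]
    constructor
    · rintro ⟨q, hq, hne, hhit⟩
      obtain ⟨li', lj, hpi', hpj, x, hxli, hxlj⟩ := (pvHit_iff g pi q.2).1 hhit
      rw [hpi] at hpi'
      injection hpi' with h'
      subst h'
      refine ⟨x, hxli, ?_⟩
      have h1 : pvHas g x pi = true := (pvHas_iff g x pi).2 ⟨li, hpi, hxli⟩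
      have h2 : pvHas g x q.2 = true := (pvHas_iff g x q.2).2 ⟨lj, hpj, hxlj⟩
      have hne' : ((i, pi) : Int × String) ≠ q := by
        intro h
        exact hne (by rw [← h])
      have := @two_le_countP (Int × String) (fun r => pvHas g x r.2) (PySem.List.enumerate pred) (i, pi) q hmem hq hne' h1 h2
      rw [countP_snd (pvHas g x) pred]
      exact_mod_cast this
    · rintro ⟨x, hxli, hcnt⟩
      have hcnt' : 2 ≤ (PySem.List.enumerate pred).countP (fun r => pvHas g x r.2) := by
        rw [← countP_snd (pvHas g x) pred]
        exact_mod_cast hcnt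
      have hpw : ((PySem.List.enumerate pred).filter (fun r => pvHas g x r.2)).Pairwise
          (fun p q => p.1 < q.1) := (PySem.List.pairwise_lt_enumerate pred 0).filter _
      rw [List.countP_eq_length_filter] at hcnt'
      rcases hfe : (PySem.List.enumerate pred).filter (fun r => pvHas g x r.2) with _ | ⟨a, _ | ⟨b, rest⟩⟩
      · rw [hfe] at hcnt'; simp at hcnt'
      · rw [hfe] at hcnt'; simp at hcnt'
      · rw [hfe] at hpw
        have hab : a.1 < b.1 := (List.pairwise_cons.1 hpw).1 b (by simp)
        have ha : a ∈ (PySem.List.enumerate pred).filter (fun r => pvHas g x r.2) := by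
          rw [hfe]; simp
        have hb : b ∈ (PySem.List.enumerate pred).filter (fun r => pvHas g x r.2) := by
          rw [hfe]; simp
        have hamem := List.mem_filter.1 ha
        have hbmem := List.mem_filter.1 hb
        obtain ⟨la, hla, hxla⟩ := (pvHas_iff g x a.2).1 hamem.2
        obtain ⟨lb, hlb, hxlb⟩ := (pvHas_iff g x b.2).1 hbmem.2
        by_cases hai : a.1 = i
        · refine ⟨b, hbmem.1, ?_, ?_⟩
          · omega
          · exact (pvHit_iff g pi b.2).2 ⟨li, lb, hpi, hlb, x, hxli, hxlb⟩
        · refine ⟨a, hamem.1, fun h => hai h.symm, ?_⟩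
          exact (pvHit_iff g pi a.2).2 ⟨li, la, hpi, hla, x, hxli, hxla⟩

-- ===== VERDICT (by name: the statement is the Claim_ definition above) =====
theorem correct_pred_spec : Claim_equal_correct_pred := by
  intro pred genres nodes _dom
  unfold Spec_correct_pred
  rw [A_eq pred genres nodes, B_eq pred genres nodes]
  congr 1
  rw [countP_snd (pvGood (PySem.Dict.mk genres) pred) pred]
  apply List.countP_congr
  intro q hq
  rw [main_pt (PySem.Dict.mk genres) pred q.1 q.2 hq]
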